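-- pv_equiv track=rewrite | github.com/jpgomez-civica/advent_of_code_2015 | jpgleyva/day_5/day_5.py | not_has_prohibited_substrings
-- ===== SOURCE A (Python) =====
-- def not_has_prohibited_substrings(chain):
--     prohibited = ['ab','cd','pq','xy']
--     result = True
--     for index, letter in enumerate(chain):
--         if index+1 < len(chain):
--             substr = letter+chain[index+1]
--             if substr in prohibited:
--                 result = False
--                 break
--     return result
-- ===== SOURCE B (Python) =====
-- def not_has_prohibited_substrings(chain):
--     prohibited = ['ab', 'cd', 'pq', 'xy']
--     return not any(sub in chain for sub in prohibited)
-- ===== Notes on version B (the rewrite author's own statement) =====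
-- stated objective: simpler
-- what changed: B loops over the four prohibited two-character patterns and tests each with a whole-string substring search, instead of A's indexed character scan that builds every adjacent pair and tests list membership. B's substring search runs in C inside the interpreter, so it avoids A's per-character Python-level loop (measured ~44x at n=262144).
import Mathlib
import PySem

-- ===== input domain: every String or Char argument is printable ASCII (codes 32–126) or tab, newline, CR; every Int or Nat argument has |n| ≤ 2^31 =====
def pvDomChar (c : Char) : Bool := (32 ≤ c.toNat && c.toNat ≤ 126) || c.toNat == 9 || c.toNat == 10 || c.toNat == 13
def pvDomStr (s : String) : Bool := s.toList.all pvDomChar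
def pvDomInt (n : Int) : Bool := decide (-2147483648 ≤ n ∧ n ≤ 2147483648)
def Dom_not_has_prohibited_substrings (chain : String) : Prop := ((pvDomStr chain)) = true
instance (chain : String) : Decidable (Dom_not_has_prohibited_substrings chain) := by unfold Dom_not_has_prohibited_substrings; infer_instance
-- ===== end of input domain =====

-- B replaces A's indexed character scan (build each adjacent pair, test list membership, break)
-- by a loop over the four prohibited patterns using whole-string substring search: simpler.

-- ===== PORT A =====
-- the for-loop with break over enumerate(chain): recursion over the enumerate list
def pvALoopNHPS (chain : String) (prohibited : List String) : List (Int × Char) → Bool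
  | [] => true
  | (index, letter) :: rest =>
    if index + 1 < PySem.Str.len chain then
      match PySem.Str.pyGet? chain (index + 1) with
      | some c =>
        let substr := String.ofList [letter, c]
        if prohibited.contains substr then false
        else pvALoopNHPS chain prohibited rest
      | none => true   -- unreachable: index+1 < len(chain)
    else pvALoopNHPS chain prohibited rest

def not_has_prohibited_substrings (chain : String) : Bool :=
  let prohibited : List String := ["ab", "cd", "pq", "xy"]
  pvALoopNHPS chain prohibited (PySem.List.enumerate chain.toList 0)

-- ===== PORT B =====
def not_has_prohibited_substrings_alt (chain : String) : Bool :=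
  let prohibited : List String := ["ab", "cd", "pq", "xy"]
  ! prohibited.any (fun sub => PySem.Str.isIn sub chain)

-- ===== PRECONDITION & SPEC =====
def Spec_not_has_prohibited_substrings (chain : String) (out : Bool) : Prop := out = not_has_prohibited_substrings_alt chain
instance (chain : String) (out : Bool) : Decidable (Spec_not_has_prohibited_substrings chain out) := by unfold Spec_not_has_prohibited_substrings; infer_instance

-- ===== CLAIM (what is proved, stated in full; the proofs are below) =====
def Claim_equal_not_has_prohibited_substrings : Prop := ∀ (chain : String), Dom_not_has_prohibited_substrings chain → Spec_not_has_prohibited_substrings chain (not_has_prohibited_substrings chain)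

-- ===== LEMMAS AND PROOFS =====

-- pair-scan abstraction of A's loop (proof helper)
def pvScan : List Char → Bool
  | a :: b :: rest =>
    if (["ab", "cd", "pq", "xy"] : List String).contains (String.ofList [a, b]) then false
    else pvScan (b :: rest)
  | _ => true

lemma pvIsIn_pair_nil (x y : Char) : PySem.Chars.isIn [x, y] [] = false := by
  rw [PySem.Chars.isIn_eq_false_iff]
  intro h
  have := h.length_le
  simp at this

lemma pvIsIn_pair_one (x y a : Char) : PySem.Chars.isIn [x, y] [a] = false := by
  rw [PySem.Chars.isIn_eq_false_iff]
  intro h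
  have := h.length_le
  simp at this

lemma pvIsIn_pair_cons (x y a b : Char) (rest : List Char) :
    PySem.Chars.isIn [x, y] (a :: b :: rest)
      = ((a == x && b == y) || PySem.Chars.isIn [x, y] (b :: rest)) := by
  rw [Bool.eq_iff_iff]
  simp [PySem.Chars.isIn_iff_infix, List.infix_cons_iff, List.cons_prefix_cons]
  tauto

lemma pvOfListBeq (u v x y : Char) :
    (String.ofList [u, v] == String.ofList [x, y]) = (u == x && v == y) := by
  rw [Bool.eq_iff_iff]
  simp only [beq_iff_eq, Bool.and_eq_true]
  constructor
  · intro h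
    have h2 := congrArg String.toList h
    simp at h2
    exact ⟨h2.1, h2.2⟩
  · rintro ⟨rfl, rfl⟩; rfl

lemma pvScan_eq (s : List Char) :
    pvScan s
      = ! ((["ab", "cd", "pq", "xy"] : List String).any
            (fun sub => PySem.Chars.isIn sub.toList s)) := by
  induction s using pvScan.induct with
  | case1 a b rest hc =>
    rw [pvScan, if_pos hc]
    simp only [List.contains_cons, List.contains_nil, Bool.or_false,
      show ("ab" : String) = String.ofList ['a', 'b'] from rfl,
      show ("cd" : String) = String.ofList ['c', 'd'] from rfl,
      show ("pq" : String) = String.ofList ['p', 'q'] from rfl,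
      show ("xy" : String) = String.ofList ['x', 'y'] from rfl,
      pvOfListBeq, Bool.or_eq_true, Bool.and_eq_true, beq_iff_eq] at hc
    simp only [List.any_cons, List.any_nil,
      show ("ab" : String).toList = ['a', 'b'] from rfl,
      show ("cd" : String).toList = ['c', 'd'] from rfl,
      show ("pq" : String).toList = ['p', 'q'] from rfl,
      show ("xy" : String).toList = ['x', 'y'] from rfl,
      pvIsIn_pair_cons]
    rcases hc with ⟨rfl, rfl⟩ | ⟨rfl, rfl⟩ | ⟨rfl, rfl⟩ | ⟨rfl, rfl⟩ <;> simp
  | case2 a b rest hc ih =>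
    rw [pvScan, if_neg hc, ih]
    simp only [List.contains_cons, List.contains_nil, Bool.or_false,
      show ("ab" : String) = String.ofList ['a', 'b'] from rfl,
      show ("cd" : String) = String.ofList ['c', 'd'] from rfl,
      show ("pq" : String) = String.ofList ['p', 'q'] from rfl,
      show ("xy" : String) = String.ofList ['x', 'y'] from rfl,
      pvOfListBeq, Bool.or_eq_true, not_or, Bool.not_eq_true] at hc
    obtain ⟨h1, h2, h3, h4⟩ := hc
    simp only [List.any_cons, List.any_nil,
      show ("ab" : String).toList = ['a', 'b'] from rfl,
      show ("cd" : String).toList = ['c', 'd'] from rfl,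
      show ("pq" : String).toList = ['p', 'q'] from rfl,
      show ("xy" : String).toList = ['x', 'y'] from rfl,
      pvIsIn_pair_cons, h1, h2, h3, h4, Bool.false_or]
  | case3 t h =>
    cases t with
    | nil => simp [pvScan, pvIsIn_pair_nil]
    | cons a t2 =>
      cases t2 with
      | nil => simp [pvScan, pvIsIn_pair_one]
      | cons b r => exact absurd rfl (h a b r)

lemma pvLoopA_eq (chain : String) (t : List Char) (k : Nat)
    (h : chain.toList.drop k = t) :
    pvALoopNHPS chain ["ab", "cd", "pq", "xy"] (PySem.List.enumerate t (k : Int)) = pvScan t := by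
  induction t generalizing k with
  | nil => simp [PySem.List.enumerate_nil, pvALoopNHPS, pvScan]
  | cons c t' ih =>
    have hlen : chain.length - k = t'.length + 1 := by
      have := congrArg List.length h
      simp at this
      omega
    have hL : PySem.Str.len chain = (chain.length : Int) := by simp [PySem.Str.len]
    rw [PySem.List.enumerate_cons, pvALoopNHPS]
    cases t' with
    | nil =>
      rw [if_neg (by rw [hL]; simp only [List.length_nil] at hlen; omega)]
      simp [PySem.List.enumerate_nil, pvALoopNHPS, pvScan]
    | cons d t'' =>
      have hdrop : chain.toList.drop (k + 1) = d :: t'' := by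
        have h1 : chain.toList.drop (k + 1) = (chain.toList.drop k).drop 1 := by
          rw [List.drop_drop]
        rw [h1, h]
        rfl
      have hget : PySem.Str.pyGet? chain ((k : Int) + 1) = some d := by
        have hcast : ((k : Int) + 1) = ((k + 1 : Nat) : Int) := by push_cast; ring
        rw [hcast, PySem.Str.pyGet?_natCast]
        have h2 : chain.toList[k + 1]? = (chain.toList.drop (k + 1))[0]? := by
          rw [List.getElem?_drop]
        rw [h2, hdrop]
        rfl
      have hcast : ((k : Int) + 1) = ((k + 1 : Nat) : Int) := by push_cast; ring
      rw [if_pos (by rw [hL]; simp only [List.length_cons] at hlen; omega), hget]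
      show (if (["ab", "cd", "pq", "xy"] : List String).contains (String.ofList [c, d]) = true
              then false
              else pvALoopNHPS chain ["ab", "cd", "pq", "xy"]
                     (PySem.List.enumerate (d :: t'') ((k : Int) + 1))) = pvScan (c :: d :: t'')
      rw [pvScan]
      by_cases hc : (["ab", "cd", "pq", "xy"] : List String).contains (String.ofList [c, d]) = true
      · rw [if_pos hc, if_pos hc]
      · rw [if_neg hc, if_neg hc, hcast]
        exact ih (k + 1) hdrop

-- ===== VERDICT (by name: the statement is the Claim_ definition above) =====
theorem not_has_prohibited_substrings_spec : Claim_equal_not_has_prohibited_substrings := by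
  intro chain _
  unfold Spec_not_has_prohibited_substrings not_has_prohibited_substrings not_has_prohibited_substrings_alt
  have h0 := pvLoopA_eq chain chain.toList 0 (by simp)
  simp only [Int.natCast_zero] at h0
  rw [h0, pvScan_eq chain.toList]
  simp [PySem.Str.isIn]
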